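-- pv_equiv track=rewrite | github.com/OmarAlmighty/Introduction-to-Programming-Using-Python-Liang-1st-edtion | CH06/EX6.31.py | getTotalDaysInYears
-- ===== SOURCE A (Python) =====
-- def getTotalDaysInYears(year):
--     total = 0
--
--     # Get the total days from 1970 to the specified year
--     for i in range(1970, year + 1):
--         if isLeapYear(i):
--             total = total + 366
--         else:
--             total = total + 365
--
--     return total
--
-- def isLeapYear(year):
--     return year % 400 == 0 or (year % 4 == 0 and year % 100 != 0)
-- ===== SOURCE B (Python) =====
-- def getTotalDaysInYears(year):
--     # Closed form: 365 days per year plus one per leap year, counted by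
--     # floor-division inclusion-exclusion.
--     if year < 1970:
--         return 0
--     def leaps(y):
--         return y // 4 - y // 100 + y // 400
--     return 365 * (year - 1969) + leaps(year) - leaps(1969)
-- ===== Notes on version B (the rewrite author's own statement) =====
-- stated objective: faster
-- what changed: Replaces the per-year loop with a closed form: a fixed number of days per elapsed year plus a leap-year count computed by floor-division inclusion-exclusion (y//4 - y//100 + y//400).
import Mathlib
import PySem

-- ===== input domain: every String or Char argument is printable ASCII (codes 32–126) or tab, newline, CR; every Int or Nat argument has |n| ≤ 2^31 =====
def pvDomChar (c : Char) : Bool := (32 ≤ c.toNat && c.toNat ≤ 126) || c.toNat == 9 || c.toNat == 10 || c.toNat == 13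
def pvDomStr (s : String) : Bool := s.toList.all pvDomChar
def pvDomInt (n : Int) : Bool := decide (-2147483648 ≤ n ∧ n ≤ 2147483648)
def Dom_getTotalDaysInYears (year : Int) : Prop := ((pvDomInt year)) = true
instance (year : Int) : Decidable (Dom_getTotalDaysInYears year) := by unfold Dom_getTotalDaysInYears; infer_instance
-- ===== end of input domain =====

-- B replaces A's per-year loop by a closed form (365 per year + leap count via floor-division inclusion-exclusion): asymptotically faster.

-- ===== PORT A =====
def isLeapYear (year : Int) : Bool :=
  PySem.Int.mod year 400 == 0 || (PySem.Int.mod year 4 == 0 && PySem.Int.mod year 100 != 0)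

def getTotalDaysInYears (year : Int) : Int :=
  (PySem.List.pyRange 1970 (year + 1) 1).foldl
    (fun total i => if isLeapYear i then total + 366 else total + 365) 0

-- ===== PORT B =====
def pvLeaps (y : Int) : Int :=
  PySem.Int.floordiv y 4 - PySem.Int.floordiv y 100 + PySem.Int.floordiv y 400

def getTotalDaysInYears_alt (year : Int) : Int :=
  if year < 1970 then 0
  else 365 * (year - 1969) + pvLeaps year - pvLeaps 1969

-- ===== PRECONDITION & SPEC =====
def Spec_getTotalDaysInYears (year : Int) (out : Int) : Prop := out = getTotalDaysInYears_alt year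
instance (year : Int) (out : Int) : Decidable (Spec_getTotalDaysInYears year out) := by unfold Spec_getTotalDaysInYears; infer_instance

-- ===== CLAIM (what is proved, stated in full; the proofs are below) =====
def Claim_equal_getTotalDaysInYears : Prop := ∀ (year : Int), Dom_getTotalDaysInYears year → Spec_getTotalDaysInYears year (getTotalDaysInYears year)

-- ===== LEMMAS AND PROOFS =====

-- leap-count step: pvLeaps y - pvLeaps (y-1) is 1 exactly on leap years
theorem pvLeaps_step (y : Int) :
    pvLeaps y = pvLeaps (y - 1) + (if isLeapYear y then 1 else 0) := by
  unfold pvLeaps isLeapYear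
  rw [PySem.Int.floordiv_eq_ediv_of_pos (a := y) (by norm_num),
      PySem.Int.floordiv_eq_ediv_of_pos (a := y) (b := 100) (by norm_num),
      PySem.Int.floordiv_eq_ediv_of_pos (a := y) (b := 400) (by norm_num),
      PySem.Int.floordiv_eq_ediv_of_pos (a := y - 1) (by norm_num),
      PySem.Int.floordiv_eq_ediv_of_pos (a := y - 1) (b := 100) (by norm_num),
      PySem.Int.floordiv_eq_ediv_of_pos (a := y - 1) (b := 400) (by norm_num),
      PySem.Int.mod_eq_emod_of_pos (a := y) (b := 400) (by norm_num),
      PySem.Int.mod_eq_emod_of_pos (a := y) (b := 100) (by norm_num),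
      PySem.Int.mod_eq_emod_of_pos (a := y) (b := 4) (by norm_num)]
  simp only [beq_iff_eq, bne_iff_ne, Bool.or_eq_true, Bool.and_eq_true, ne_eq]
  split_ifs <;> omega

theorem alt_step (y : Int) (hy : 1970 ≤ y) :
    getTotalDaysInYears_alt y =
      getTotalDaysInYears_alt (y - 1) + (if isLeapYear y then 366 else 365) := by
  unfold getTotalDaysInYears_alt
  have h := pvLeaps_step y
  by_cases h1 : y - 1 < 1970
  · have hy' : y = 1970 := by omega
    subst hy'
    simp only [if_neg (by omega : ¬ (1970 : Int) < 1970), if_pos h1]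
    have : pvLeaps 1970 = pvLeaps 1969 + (if isLeapYear 1970 then 1 else 0) := by
      simpa using pvLeaps_step 1970
    split_ifs at this ⊢ <;> omega
  · simp only [if_neg (by omega : ¬ y < 1970), if_neg h1]
    split_ifs at h ⊢ <;> omega

theorem a_step (y : Int) (hy : 1970 ≤ y) :
    getTotalDaysInYears y =
      getTotalDaysInYears (y - 1) + (if isLeapYear y then 366 else 365) := by
  unfold getTotalDaysInYears
  rw [PySem.List.pyRange_one_succ_right hy, List.foldl_append]
  simp only [List.foldl_cons, List.foldl_nil]
  rw [show y - 1 + 1 = y from by ring]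
  split_ifs <;> ring

theorem main_lemma (n : Nat) :
    getTotalDaysInYears (1969 + n) = getTotalDaysInYears_alt (1969 + n) := by
  induction n with
  | zero =>
      unfold getTotalDaysInYears getTotalDaysInYears_alt
      rw [PySem.List.pyRange_one_eq_nil (by norm_num)]
      norm_num
  | succ k ih =>
      have h1 : (1969 : Int) + ((k + 1 : Nat) : Int) = 1969 + (k : Nat) + 1 := by
        push_cast; ring
      rw [h1, a_step _ (by omega), alt_step _ (by omega)]
      rw [show (1969 : Int) + (k : Nat) + 1 - 1 = 1969 + (k : Nat) from by ring, ih]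

-- ===== VERDICT (by name: the statement is the Claim_ definition above) =====
theorem getTotalDaysInYears_spec : Claim_equal_getTotalDaysInYears := by
  intro year _
  unfold Spec_getTotalDaysInYears
  by_cases h : year < 1970
  · unfold getTotalDaysInYears getTotalDaysInYears_alt
    rw [PySem.List.pyRange_one_eq_nil (by omega)]
    simp [h]
  · obtain ⟨n, hn⟩ : ∃ n : Nat, year = 1969 + (n : Int) := ⟨(year - 1969).toNat, by omega⟩
    rw [hn]
    exact main_lemma n
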